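-- pv_equiv track=rewrite | github.com/seescoto/calculator | calcFunctions.py | toStandardNumber
-- ===== SOURCE A (Python) =====
-- import math
--
-- def toStandardNumber(string):
--    result = string
--
--    #if e
--    if "e" in string:
--       result = result.replace("e", str(math.e))
--       result = toStandardNumber(result) #run it again so if its negative itll still work
--    #if pi
--    elif "p" in string:
--       result = result.replace("p", str(math.pi))
--       result = toStandardNumber(result)
--    #if it's negative (like n1*10 means -10)
--    elif string[0] == "n":
--       result = result.replace("n", "-")
--
--    return result
-- ===== SOURCE B (Python) =====
-- import math
--
-- def toStandardNumber(string):
--     # single pass: substitute each marker character directly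
--     result = "".join(
--         str(math.e) if c == "e" else str(math.pi) if c == "p" else c
--         for c in string)
--     if result[0] == "n":
--         result = result.replace("n", "-")
--     return result
-- ===== Notes on version B (the rewrite author's own statement) =====
-- stated objective: simpler
-- what changed: Replaces A's recursive whole-string replace-and-retry with a single character-by-character pass that joins each marker's substitution directly, followed by the same first-char n-check.
import Mathlib
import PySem

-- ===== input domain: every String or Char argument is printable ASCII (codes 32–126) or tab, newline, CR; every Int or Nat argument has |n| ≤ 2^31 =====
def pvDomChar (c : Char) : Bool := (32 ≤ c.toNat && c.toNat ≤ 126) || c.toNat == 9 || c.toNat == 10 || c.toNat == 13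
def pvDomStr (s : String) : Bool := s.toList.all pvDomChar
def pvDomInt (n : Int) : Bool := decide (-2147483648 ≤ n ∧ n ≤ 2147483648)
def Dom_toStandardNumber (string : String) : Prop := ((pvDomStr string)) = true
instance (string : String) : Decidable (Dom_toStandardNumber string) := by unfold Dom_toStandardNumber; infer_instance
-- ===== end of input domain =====

-- B replaces A's recursive whole-string replace-and-retry by one character-by-character
-- substitution pass followed by the same first-character n-check (objective: simpler).

-- ===== PORT A =====
-- str(math.e) and str(math.pi), the exact strings CPython prints
def pvE : String := "2.718281828459045"
def pvPi : String := "3.141592653589793"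

-- termination helpers for A's recursion (cited by the port's decreasing_by)
def pvSubE (x : Char) : List Char := if x = 'e' then pvE.toList else [x]
def pvSubP (x : Char) : List Char := if x = 'p' then pvPi.toList else [x]
def pvMeasure (s : String) : Nat := 2 * s.toList.count 'e' + s.toList.count 'p'

theorem pv_go_singleton (c : Char) (new : List Char) :
    ∀ (fuel : Nat) (l acc : List Char), l.length ≤ fuel →
      PySem.Chars.replace.go [c] new fuel l acc
        = acc.reverse ++ l.flatMap (fun x => if x = c then new else [x]) := by
  intro fuel
  induction fuel with
  | zero => intro l acc h; cases l with
    | nil => simp [PySem.Chars.replace.go]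
    | cons x t => simp at h
  | succ f ih =>
    intro l acc h
    cases l with
    | nil => simp [PySem.Chars.replace.go]
    | cons x t =>
      simp only [PySem.Chars.replace.go]
      by_cases hx : x = c
      · subst hx
        have : List.isPrefixOf [x] (x :: t) = true := by
          simp [List.isPrefixOf]
        rw [if_pos this]
        rw [ih _ _ (by simpa using Nat.le_of_succ_le_succ h)]
        simp
      · have : List.isPrefixOf [c] (x :: t) = true ↔ False := by
          simp [List.isPrefixOf]; intro hc; exact hx hc.symm
        rw [if_neg (by simp [this])]
        rw [ih _ _ (by simpa using Nat.le_of_succ_le_succ h)]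
        simp [hx]

theorem pv_replace_singleton (l : List Char) (c : Char) (new : List Char) :
    PySem.Chars.replace l [c] new = l.flatMap (fun x => if x = c then new else [x]) := by
  rw [PySem.Chars.replace]
  simp only [List.isEmpty_cons, if_neg (by simp : ¬ ([c].isEmpty = true))]
  simpa using pv_go_singleton c new l.length l [] le_rfl

theorem pv_isIn_char (c : Char) (l : List Char) :
    PySem.Chars.isIn [c] l = true ↔ c ∈ l := by
  rw [PySem.Chars.isIn_iff_infix]
  constructor
  · rintro ⟨p, q, rfl⟩; simp
  · intro h; obtain ⟨p, q, rfl⟩ := List.append_of_mem h; exact ⟨p, q, by simp⟩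

theorem pv_count_flatMap (f : Char → List Char) (c : Char) :
    ∀ l : List Char, (l.flatMap f).count c = (l.map (fun x => (f x).count c)).sum := by
  intro l
  induction l with
  | nil => simp
  | cons x t ih => simp [List.count_append, ih]

theorem pv_cnt_subE_p : ∀ l : List Char, (l.map (fun x => (pvSubE x).count 'p')).sum = l.count 'p' := by
  intro l
  induction l with
  | nil => simp
  | cons x t ih =>
    have key : (pvSubE x).count 'p' = if x = 'p' then 1 else 0 := by
      by_cases hx : x = 'e'
      · subst hx
        have h0 : pvE.toList.count 'p' = 0 := by decide
        simp [pvSubE, h0]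
      · simp [pvSubE, hx, List.count_singleton]
    rw [List.map_cons, List.sum_cons, key, List.count_cons, ih]
    by_cases h2 : x = 'p' <;> simp [h2, Nat.add_comm]

theorem pv_cnt_subP_e : ∀ l : List Char, (l.map (fun x => (pvSubP x).count 'e')).sum = l.count 'e' := by
  intro l
  induction l with
  | nil => simp
  | cons x t ih =>
    have key : (pvSubP x).count 'e' = if x = 'e' then 1 else 0 := by
      by_cases hx : x = 'p'
      · subst hx
        have h0 : pvPi.toList.count 'e' = 0 := by decide
        simp [pvSubP, h0]
      · simp [pvSubP, hx, List.count_singleton]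
    rw [List.map_cons, List.sum_cons, key, List.count_cons, ih]
    by_cases h2 : x = 'e' <;> simp [h2, Nat.add_comm]

theorem pv_meas_e (s : String) (h : PySem.Str.isIn "e" s = true) :
    pvMeasure (PySem.Str.replace s "e" pvE) < pvMeasure s := by
  have he : 'e' ∈ s.toList := by
    rw [PySem.Str.isIn_eq] at h
    exact (pv_isIn_char 'e' s.toList).mp (by simpa using h)
  have hrw : (PySem.Str.replace s "e" pvE).toList = s.toList.flatMap pvSubE := by
    rw [PySem.Str.toList_replace]
    have : ("e" : String).toList = ['e'] := by decide
    rw [this, pv_replace_singleton]; rfl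
  unfold pvMeasure
  rw [hrw, pv_count_flatMap, pv_count_flatMap]
  have h1 : (s.toList.map (fun x => (pvSubE x).count 'e')).sum = 0 := by
    rw [List.sum_eq_zero_iff]; intro n hn
    simp only [List.mem_map] at hn
    obtain ⟨x, _, rfl⟩ := hn
    by_cases hx : x = 'e' <;> simp [pvSubE, hx] <;> decide
  have h2 := pv_cnt_subE_p s.toList
  rw [h1, h2]
  have : 1 ≤ s.toList.count 'e' := List.one_le_count_iff.mpr he
  omega

theorem pv_meas_p (s : String) (h : PySem.Str.isIn "p" s = true) :
    pvMeasure (PySem.Str.replace s "p" pvPi) < pvMeasure s := by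
  have hp : 'p' ∈ s.toList := by
    rw [PySem.Str.isIn_eq] at h
    exact (pv_isIn_char 'p' s.toList).mp (by simpa using h)
  have hrw : (PySem.Str.replace s "p" pvPi).toList = s.toList.flatMap pvSubP := by
    rw [PySem.Str.toList_replace]
    have : ("p" : String).toList = ['p'] := by decide
    rw [this, pv_replace_singleton]; rfl
  unfold pvMeasure
  rw [hrw, pv_count_flatMap, pv_count_flatMap]
  have h1 : (s.toList.map (fun x => (pvSubP x).count 'p')).sum = 0 := by
    rw [List.sum_eq_zero_iff]; intro n hn
    simp only [List.mem_map] at hn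
    obtain ⟨x, _, rfl⟩ := hn
    by_cases hx : x = 'p' <;> simp [pvSubP, hx] <;> decide
  have h2 := pv_cnt_subP_e s.toList
  rw [h1, h2]
  have : 1 ≤ s.toList.count 'p' := List.one_le_count_iff.mpr hp
  omega

def toStandardNumber (string : String) : String :=
  let result := string
  if he : PySem.Str.isIn "e" string = true then
    toStandardNumber (PySem.Str.replace result "e" pvE)
  else if hp : PySem.Str.isIn "p" string = true then
    toStandardNumber (PySem.Str.replace result "p" pvPi)
  else if PySem.Str.pyGet? string 0 = some 'n' then
    PySem.Str.replace result "n" "-"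
  else result
termination_by pvMeasure string
decreasing_by
  · exact pv_meas_e string he
  · exact pv_meas_p string hp

-- ===== PORT B =====
def toStandardNumber_alt (string : String) : String :=
  let result := PySem.Str.join "" (string.toList.map (fun c =>
    if c = 'e' then pvE else if c = 'p' then pvPi else String.ofList [c]))
  if PySem.Str.pyGet? result 0 = some 'n' then
    PySem.Str.replace result "n" "-"
  else result

-- ===== PRECONDITION & SPEC =====
-- Pre_ excludes only the empty string, where Python A (and B) raise IndexError on string[0].
def Pre_toStandardNumber (string : String) : Prop := string ≠ ""
instance (string : String) : Decidable (Pre_toStandardNumber string) := by unfold Pre_toStandardNumber; infer_instance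
def pvWitness_toStandardNumber : String := "ne1"

def Spec_toStandardNumber (string : String) (out : String) : Prop := out = toStandardNumber_alt string
instance (string : String) (out : String) : Decidable (Spec_toStandardNumber string out) := by unfold Spec_toStandardNumber; infer_instance

-- ===== CLAIM (what is proved, stated in full; the proofs are below) =====
def Claim_equal_toStandardNumber : Prop := ∀ (string : String), Dom_toStandardNumber string → Pre_toStandardNumber string → Spec_toStandardNumber string (toStandardNumber string)

-- ===== LEMMAS AND PROOFS =====

-- B's per-character substitution
def pvSub (x : Char) : List Char :=
  if x = 'e' then pvE.toList else if x = 'p' then pvPi.toList else [x]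

-- the trailing n-check shared by both programs
def pvNfix (t : String) : String :=
  if PySem.Str.pyGet? t 0 = some 'n' then PySem.Str.replace t "n" "-" else t

theorem pv_join_empty : ∀ parts : List (List Char), PySem.Chars.join [] parts = parts.flatten := by
  intro parts
  induction parts with
  | nil => rfl
  | cons x t ih =>
    cases t with
    | nil => simp [PySem.Chars.join, List.intercalate]
    | cons y u =>
      rw [PySem.Chars.join_cons_cons]
      rw [ih]
      simp

theorem pv_sub_fix (l : List Char) (h : ∀ x ∈ l, x ≠ 'e' ∧ x ≠ 'p') :
    l.flatMap pvSub = l := by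
  induction l with
  | nil => rfl
  | cons x t ih =>
    have hx := h x (by simp)
    simp only [List.flatMap_cons]
    rw [ih (fun y hy => h y (by simp [hy]))]
    simp [pvSub, hx.1, hx.2]

theorem pv_E_fix : pvE.toList.flatMap pvSub = pvE.toList := by decide
theorem pv_Pi_fix : pvPi.toList.flatMap pvSub = pvPi.toList := by decide

theorem pv_sub_subE (l : List Char) :
    (l.flatMap pvSubE).flatMap pvSub = l.flatMap pvSub := by
  induction l with
  | nil => rfl
  | cons x t ih =>
    simp only [List.flatMap_cons, List.flatMap_append, ih]
    by_cases hx : x = 'e'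
    · subst hx; rw [show pvSubE 'e' = pvE.toList from by simp [pvSubE]]
      rw [pv_E_fix, show pvSub 'e' = pvE.toList from by simp [pvSub]]
    · simp [pvSubE, hx]

theorem pv_sub_subP (l : List Char) :
    (l.flatMap pvSubP).flatMap pvSub = l.flatMap pvSub := by
  induction l with
  | nil => rfl
  | cons x t ih =>
    simp only [List.flatMap_cons, List.flatMap_append, ih]
    by_cases hx : x = 'p'
    · subst hx; rw [show pvSubP 'p' = pvPi.toList from by simp [pvSubP]]
      rw [pv_Pi_fix, show pvSub 'p' = pvPi.toList from by simp [pvSub]]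
    · by_cases hex : x = 'e'
      · subst hex; simp [pvSubP, pvSub]
      · simp [pvSubP, pvSub, hx, hex]

theorem pv_A_eq : ∀ (n : Nat) (s : String), pvMeasure s ≤ n →
    toStandardNumber s = pvNfix (String.ofList (s.toList.flatMap pvSub)) := by
  intro n
  induction n with
  | zero =>
    intro s h
    have he : ¬ ('e' ∈ s.toList) := by
      intro hm
      have := List.one_le_count_iff.mpr hm
      unfold pvMeasure at h; omega
    have hp : ¬ ('p' ∈ s.toList) := by
      intro hm
      have := List.one_le_count_iff.mpr hm
      unfold pvMeasure at h; omega
    have hie : ¬ (PySem.Str.isIn "e" s = true) := by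
      intro hb
      rw [PySem.Str.isIn_eq, show ("e" : String).toList = ['e'] from by decide] at hb
      exact he ((pv_isIn_char 'e' s.toList).mp hb)
    have hip : ¬ (PySem.Str.isIn "p" s = true) := by
      intro hb
      rw [PySem.Str.isIn_eq, show ("p" : String).toList = ['p'] from by decide] at hb
      exact hp ((pv_isIn_char 'p' s.toList).mp hb)
    rw [toStandardNumber]
    rw [dif_neg hie, dif_neg hip]
    rw [pv_sub_fix s.toList (fun x hx => ⟨fun hc => he (hc ▸ hx), fun hc => hp (hc ▸ hx)⟩)]
    simp [pvNfix]
  | succ n ih =>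
    intro s h
    by_cases hie : PySem.Str.isIn "e" s = true
    · rw [toStandardNumber, dif_pos hie]
      have hrw : (PySem.Str.replace s "e" pvE).toList = s.toList.flatMap pvSubE := by
        rw [PySem.Str.toList_replace, show ("e" : String).toList = ['e'] from by decide,
          pv_replace_singleton]; rfl
      have hm : pvMeasure (PySem.Str.replace s "e" pvE) ≤ n := by
        have := pv_meas_e s hie
        omega
      rw [ih _ hm, hrw, pv_sub_subE]
    · by_cases hip : PySem.Str.isIn "p" s = true
      · rw [toStandardNumber, dif_neg hie, dif_pos hip]
        have hrw : (PySem.Str.replace s "p" pvPi).toList = s.toList.flatMap pvSubP := by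
          rw [PySem.Str.toList_replace, show ("p" : String).toList = ['p'] from by decide,
            pv_replace_singleton]; rfl
        have hm : pvMeasure (PySem.Str.replace s "p" pvPi) ≤ n := by
          have := pv_meas_p s hip
          omega
        rw [ih _ hm, hrw, pv_sub_subP]
      · have he : ¬ ('e' ∈ s.toList) := by
          intro hm
          apply hie
          rw [PySem.Str.isIn_eq, show ("e" : String).toList = ['e'] from by decide]
          exact (pv_isIn_char 'e' s.toList).mpr hm
        have hp : ¬ ('p' ∈ s.toList) := by
          intro hm
          apply hip
          rw [PySem.Str.isIn_eq, show ("p" : String).toList = ['p'] from by decide]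
          exact (pv_isIn_char 'p' s.toList).mpr hm
        rw [toStandardNumber, dif_neg hie, dif_neg hip]
        rw [pv_sub_fix s.toList (fun x hx => ⟨fun hc => he (hc ▸ hx), fun hc => hp (hc ▸ hx)⟩)]
        simp [pvNfix]

theorem pv_B_eq (s : String) :
    toStandardNumber_alt s = pvNfix (String.ofList (s.toList.flatMap pvSub)) := by
  unfold toStandardNumber_alt pvNfix
  have hjoin : (PySem.Str.join "" (s.toList.map (fun c =>
      if c = 'e' then pvE else if c = 'p' then pvPi else String.ofList [c])))
      = String.ofList (s.toList.flatMap pvSub) := by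
    apply String.toList_injective
    rw [PySem.Str.toList_join]
    rw [show ("" : String).toList = [] from rfl, pv_join_empty]
    simp only [List.map_map, String.toList_ofList, List.flatMap]
    congr 1
    apply List.map_congr_left
    intro x _
    by_cases hx : x = 'e'
    · simp [pvSub, hx]
    · by_cases hp : x = 'p' <;> simp [pvSub, hx, hp]
  rw [hjoin]

-- ===== VERDICT (by name: the statement is the Claim_ definition above) =====
theorem toStandardNumber_spec : Claim_equal_toStandardNumber := by
  intro s _ hpre
  unfold Spec_toStandardNumber
  rw [pv_A_eq (pvMeasure s) s le_rfl, pv_B_eq]
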